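-- pv_equiv track=rewrite | github.com/iLab53/apex-launch-readiness-tool | strategist-engine/output_formatter.py | _build_signal_digest
-- ===== SOURCE A (Python) =====
-- def _build_signal_digest(signals: list[dict]) -> str:
--     by_region: dict[str, list[str]] = {}
--
--     for s in signals:
--         region   = s.get('region', 'Global')
--         country  = s.get('country', '')
--         source   = s.get('source', '')
--         headline = s.get('headline', '').strip()
--         date     = s.get('publication_date', '')[:10]
--         url      = s.get('source_url', '')
--
--         if not headline:
--             continue
--
--         label = f"{country} ({source})" if country else source
--         line  = f"  - [{date}] {label}: {headline}"
--         if url: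
--             line += f"  -> {url}"
--
--         by_region.setdefault(region, []).append(line)
--
--     sections = []
--     for region in sorted(by_region):
--         items = by_region[region]
--         sections.append(f"### {region} ({len(items)} signals)\n" + "\n".join(items[:40]))
--
--     return "\n\n".join(sections)
-- ===== SOURCE B (Python) =====
-- from itertools import groupby
--
--
-- def _entry(s):
--     headline = s.get('headline', '').strip()
--     if not headline:
--         return None
--     country = s.get('country', '')
--     source = s.get('source', '')
--     date = s.get('publication_date', '')[:10]
--     url = s.get('source_url', '')
--     label = f"{country} ({source})" if country else source
--     line = f"  - [{date}] {label}: {headline}"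
--     if url:
--         line += f"  -> {url}"
--     return (s.get('region', 'Global'), line)
--
--
-- def _build_signal_digest(signals: list[dict]) -> str:
--     entries = [e for e in map(_entry, signals) if e is not None]
--     entries.sort(key=lambda t: t[0])  # stable, keyed on region only
--     sections = [
--         f"### {region} ({len(lines)} signals)\n" + "\n".join(lines[:40])
--         for region, grp in groupby(entries, key=lambda t: t[0])
--         for lines in ([line for _, line in grp],)
--     ]
--     return "\n\n".join(sections)
-- ===== Notes on version B (the rewrite author's own statement) =====
-- stated objective: alternative
-- what changed: Replaces A's dict-of-lists grouping plus sorted-keys lookup with a one-pass flat list of (region, line) tuples, a stable sort keyed on region, and a consecutive-run (groupby) scan that emits the sections.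
import Mathlib
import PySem

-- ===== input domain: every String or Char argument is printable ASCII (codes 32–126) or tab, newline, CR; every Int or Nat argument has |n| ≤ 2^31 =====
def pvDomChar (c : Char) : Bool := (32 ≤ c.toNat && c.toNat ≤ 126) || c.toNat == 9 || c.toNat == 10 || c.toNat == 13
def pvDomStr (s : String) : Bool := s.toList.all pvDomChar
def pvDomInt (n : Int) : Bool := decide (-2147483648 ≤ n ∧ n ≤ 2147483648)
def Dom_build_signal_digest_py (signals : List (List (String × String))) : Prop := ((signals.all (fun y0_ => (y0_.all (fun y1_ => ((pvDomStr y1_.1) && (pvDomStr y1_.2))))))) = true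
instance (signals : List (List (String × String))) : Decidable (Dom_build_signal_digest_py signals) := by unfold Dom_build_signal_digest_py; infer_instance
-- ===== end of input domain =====

-- B is an alternative decomposition of the same digest: one flat pass collecting (region, line)
-- entries, a stable sort on the region key, and a consecutive-run scan (itertools.groupby)
-- emitting the sections, instead of A's dict-of-lists grouping with a sorted-keys lookup.

-- ===== PORT A =====
-- loop body of A's 'for s in signals' (a literal transliteration, kept as a named helper)
def astep (d : PySem.Dict String (List String)) (s : List (String × String)) :
    PySem.Dict String (List String) :=
  let sd := PySem.Dict.mk s
  let region := sd.getD "region" "Global"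
  let country := sd.getD "country" ""
  let source := sd.getD "source" ""
  let headline := PySem.Str.strip (sd.getD "headline" "")
  let date := PySem.Str.slice (sd.getD "publication_date" "") none (some 10)
  let url := sd.getD "source_url" ""
  if headline = "" then d
  else
    let label := if country ≠ "" then country ++ " (" ++ source ++ ")" else source
    let line := "  - [" ++ date ++ "] " ++ label ++ ": " ++ headline
    let line := if url ≠ "" then line ++ "  -> " ++ url else line
    d.modify region [] (fun x => x ++ [line])

def build_signal_digest_py (signals : List (List (String × String))) : String :=
  let by_region := signals.foldl astep PySem.Dict.empty
  let sections := (PySem.List.sorted by_region.keys (fun r => r)).foldl (fun acc region =>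
    let items := by_region.getD region []
    acc ++ ["### " ++ region ++ " (" ++ PySem.Int.toStr (items.length : Int) ++ " signals)\n" ++
      PySem.Str.join "\n" (PySem.List.slice items none (some 40))]) []
  PySem.Str.join "\n\n" sections

-- ===== PORT B =====
-- _entry(s): the (region, line) tuple for one signal, or none when the stripped headline is empty
def sigEntry (s : List (String × String)) : Option (String × String) :=
  let sd := PySem.Dict.mk s
  let headline := PySem.Str.strip (sd.getD "headline" "")
  if headline = "" then none
  else
    let country := sd.getD "country" ""
    let source := sd.getD "source" ""
    let date := PySem.Str.slice (sd.getD "publication_date" "") none (some 10)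
    let url := sd.getD "source_url" ""
    let label := if country ≠ "" then country ++ " (" ++ source ++ ")" else source
    let line := "  - [" ++ date ++ "] " ++ label ++ ": " ++ headline
    let line := if url ≠ "" then line ++ "  -> " ++ url else line
    some (sd.getD "region" "Global", line)

-- itertools.groupby on the first component: consecutive runs of equal regions, lines collected
def runs : List (String × String) → List (String × List String)
  | [] => []
  | (k, v) :: t =>
    match runs t with
    | (k', vs) :: rest =>
      if k = k' then (k, v :: vs) :: rest else (k, [v]) :: (k', vs) :: rest
    | [] => [(k, [v])]

-- the section string for one groupby group
def secOf (p : String × List String) : String :=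
  "### " ++ p.1 ++ " (" ++ PySem.Int.toStr (p.2.length : Int) ++ " signals)\n" ++
    PySem.Str.join "\n" (PySem.List.slice p.2 none (some 40))

def build_signal_digest_py_alt (signals : List (List (String × String))) : String :=
  let entries := signals.filterMap sigEntry
  let es := PySem.List.sorted entries (fun t => t.1)
  PySem.Str.join "\n\n" ((runs es).map secOf)

-- ===== PRECONDITION & SPEC =====
def Spec_build_signal_digest_py (signals : List (List (String × String))) (out : String) : Prop := out = build_signal_digest_py_alt signals
instance (signals : List (List (String × String))) (out : String) : Decidable (Spec_build_signal_digest_py signals out) := by unfold Spec_build_signal_digest_py; infer_instance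

-- ===== CLAIM (what is proved, stated in full; the proofs are below) =====
def Claim_equal_build_signal_digest_py : Prop := ∀ (signals : List (List (String × String))), Dom_build_signal_digest_py signals → Spec_build_signal_digest_py signals (build_signal_digest_py signals)

-- ===== LEMMAS AND PROOFS =====

-- A's loop body, phrased through B's per-signal helper
theorem astep_eq (d : PySem.Dict String (List String)) (s : List (String × String)) :
    astep d s = match sigEntry s with
      | none => d
      | some p => d.modify p.1 [] (fun x => x ++ [p.2]) := by
  unfold astep sigEntry
  by_cases h : PySem.Str.strip ((PySem.Dict.mk s).getD "headline" "") = "" <;> simp [h]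

-- A's whole grouping loop is the modify-append fold over the surviving entries
theorem foldA (sg : List (List (String × String))) (d : PySem.Dict String (List String)) :
    sg.foldl astep d
      = (sg.filterMap sigEntry).foldl (fun d p => d.modify p.1 [] (fun x => x ++ [p.2])) d := by
  induction sg generalizing d with
  | nil => rfl
  | cons s t ih =>
    cases h : sigEntry s <;>
      simp [h, astep_eq, ih]

-- runs (x :: t) starts with a group keyed x.1
theorem runs_cons_head (x : String × String) (t : List (String × String)) :
    ∃ vs rest, runs (x :: t) = (x.1, vs) :: rest := by
  obtain ⟨k, v⟩ := x
  cases h : runs t with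
  | nil => exact ⟨[v], [], by simp [runs, h]⟩
  | cons hd rest =>
    obtain ⟨k', vs⟩ := hd
    by_cases hk : k = k'
    · exact ⟨v :: vs, rest, by simp [runs, h, hk]⟩
    · exact ⟨[v], (k', vs) :: rest, by simp [runs, h, hk]⟩

theorem mem_keys_runs (l : List (String × String)) (r : String) :
    r ∈ (runs l).map Prod.fst ↔ r ∈ l.map Prod.fst := by
  induction l with
  | nil => simp [runs]
  | cons x t ih =>
    obtain ⟨k, v⟩ := x
    cases h : runs t with
    | nil =>
      simp [runs, h] at ih ⊢
      tauto
    | cons hd rest =>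
      obtain ⟨k', vs⟩ := hd
      by_cases hk : k = k' <;>
        simp [runs, h, hk] at ih ⊢ <;> tauto

theorem keys_runs_pairwise (l : List (String × String))
    (hl : l.Pairwise (fun a b => a.1 ≤ b.1)) :
    ((runs l).map Prod.fst).Pairwise (fun a b => a < b) := by
  induction l with
  | nil => simp [runs]
  | cons x t ih =>
    obtain ⟨k, v⟩ := x
    rw [List.pairwise_cons] at hl
    obtain ⟨hk_le, ht⟩ := hl
    have ihp := ih ht
    cases h : runs t with
    | nil => simp [runs, h]
    | cons hd rest =>
      obtain ⟨k', vs⟩ := hd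
      rw [h, List.map_cons] at ihp
      have hk'mem : k' ∈ t.map Prod.fst := by
        have : k' ∈ (runs t).map Prod.fst := by simp [h]
        exact (mem_keys_runs t k').mp this
      by_cases hk : k = k'
      · have hr : (runs ((k, v) :: t)).map Prod.fst = k :: rest.map Prod.fst := by
          simp [runs, h, hk]
        rw [hr]
        rw [List.pairwise_cons] at ihp ⊢
        exact ⟨fun b hb => hk ▸ ihp.1 b hb, ihp.2⟩
      · have hkk' : k < k' := by
          obtain ⟨z, hz, hz1⟩ := List.mem_map.mp hk'mem
          exact lt_of_le_of_ne (hz1 ▸ hk_le z hz) hk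
        have hr : (runs ((k, v) :: t)).map Prod.fst = k :: k' :: rest.map Prod.fst := by
          simp [runs, h, hk]
        rw [hr]
        rw [List.pairwise_cons] at ihp
        refine List.Pairwise.cons ?_ (List.Pairwise.cons ihp.1 ihp.2)
        intro b hb
        rcases List.mem_cons.mp hb with rfl | hb
        · exact hkk'
        · exact lt_trans hkk' (ihp.1 b hb)

-- every group of runs carries exactly the lines of its key, in order
theorem runs_snd (l : List (String × String))
    (hl : l.Pairwise (fun a b => a.1 ≤ b.1)) :
    ∀ p ∈ runs l, p.2 = (l.filter (fun z => z.1 == p.1)).map (fun z => z.2) := by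
  induction l with
  | nil => simp [runs]
  | cons x t ih =>
    obtain ⟨k, v⟩ := x
    rw [List.pairwise_cons] at hl
    obtain ⟨hk_le, ht⟩ := hl
    have iht := ih ht
    cases h : runs t with
    | nil =>
      intro p hp
      have htn : t = [] := by
        cases t with
        | nil => rfl
        | cons y u => obtain ⟨vs, rest, hy⟩ := runs_cons_head y u; rw [hy] at h; cases h
      subst htn
      simp only [runs, List.mem_singleton] at hp
      subst hp
      simp
    | cons hd rest =>
      obtain ⟨k', vs⟩ := hd
      have hkp := keys_runs_pairwise t ht
      rw [h, List.map_cons, List.pairwise_cons] at hkp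
      -- k' is ≤ every key of t
      have hk'head : ∀ z ∈ t, k' ≤ z.1 := by
        intro z hz
        have hmem : z.1 ∈ (runs t).map Prod.fst :=
          (mem_keys_runs t z.1).mpr (List.mem_map_of_mem hz)
        rw [h, List.map_cons] at hmem
        rcases List.mem_cons.mp hmem with h1 | h1
        · exact le_of_eq h1.symm
        · exact le_of_lt (hkp.1 z.1 h1)
      have hk'mem : ∃ z ∈ t, z.1 = k' := by
        have : k' ∈ (runs t).map Prod.fst := by simp [h]
        obtain ⟨z, hz, hz1⟩ := List.mem_map.mp ((mem_keys_runs t k').mp this)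
        exact ⟨z, hz, hz1⟩
      by_cases hk : k = k'
      · have hr : runs ((k, v) :: t) = (k, v :: vs) :: rest := by simp [runs, h, hk]
        intro p hp
        rw [hr] at hp
        rcases List.mem_cons.mp hp with rfl | hp
        · have hvs : vs = (t.filter (fun z => z.1 == k')).map (fun z => z.2) :=
            iht (k', vs) (by rw [h]; exact List.mem_cons_self ..)
          simp [hk, hvs]
        · have hkey : k' < p.1 := hkp.1 p.1 (List.mem_map_of_mem hp)
          have hne : (k == p.1) = false := by
            simp only [beq_eq_false_iff_ne, ne_eq, hk]
            exact ne_of_lt hkey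
          have hiht := iht p (by rw [h]; exact List.mem_cons_of_mem _ hp)
          rw [List.filter_cons]
          simp only [hne, Bool.false_eq_true, if_false]
          exact hiht
      · have hkk' : k < k' := by
          obtain ⟨z, hz, hz1⟩ := hk'mem
          exact lt_of_le_of_ne (hz1 ▸ hk_le z hz) hk
        have hknot : ∀ z ∈ t, ¬ z.1 = k := by
          intro z hz
          exact ne_of_gt (lt_of_lt_of_le hkk' (hk'head z hz))
        have hr : runs ((k, v) :: t) = (k, [v]) :: (k', vs) :: rest := by
          simp [runs, h, hk]
        intro p hp
        rw [hr] at hp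
        rcases List.mem_cons.mp hp with rfl | hp
        · have hfn : t.filter (fun z => z.1 == k) = [] :=
            List.filter_eq_nil_iff.mpr (fun z hz => by simpa using hknot z hz)
          simp [hfn]
        · have hkey : k' ≤ p.1 := by
            rcases List.mem_cons.mp hp with rfl | h1
            · rfl
            · exact le_of_lt (hkp.1 p.1 (List.mem_map_of_mem h1))
          have hne : (k == p.1) = false := by
            simp only [beq_eq_false_iff_ne, ne_eq]
            exact ne_of_lt (lt_of_lt_of_le hkk' hkey)
          have hiht := iht p (by rw [h]; exact hp)
          rw [List.filter_cons]
          simp only [hne, Bool.false_eq_true, if_false]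
          exact hiht

-- inserting into a key-sorted list puts x after all entries of equal key: filters are stable
theorem insertBy_filter_key (x : String × String) (ys : List (String × String))
    (hys : ys.Pairwise (fun a b => a.1 ≤ b.1)) (r : String) :
    (PySem.List.insertBy (fun a b => decide (a.1 < b.1)) x ys).filter (fun z => z.1 == r)
      = ys.filter (fun z => z.1 == r) ++ if x.1 == r then [x] else [] := by
  induction ys with
  | nil =>
    by_cases hr : x.1 = r <;>
      simp [PySem.List.insertBy, hr]
  | cons y t ih =>
    rw [List.pairwise_cons] at hys
    obtain ⟨hy_le, ht⟩ := hys
    by_cases hlt : x.1 < y.1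
    · have hi : PySem.List.insertBy (fun a b => decide (a.1 < b.1)) x (y :: t)
          = x :: y :: t := by
        simp [PySem.List.insertBy, hlt]
      rw [hi]
      by_cases hr : x.1 = r
      · have hnone : ∀ z ∈ y :: t, ¬ z.1 = r := by
          intro z hz
          rcases List.mem_cons.mp hz with rfl | h1
          · exact fun hc => absurd (hr ▸ hc ▸ hlt) (lt_irrefl _)
          · exact fun hc => absurd (hr ▸ hc ▸ lt_of_lt_of_le hlt (hy_le z h1))
              (lt_irrefl _)
        have hfn : (y :: t).filter (fun z => z.1 == r) = [] :=
          List.filter_eq_nil_iff.mpr (fun z hz => by simpa using hnone z hz)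
        rw [List.filter_cons, hfn]
        simp [hr]
      · have hxr : (x.1 == r) = false := by simpa using hr
        rw [List.filter_cons]
        simp [hxr]
    · have hi : PySem.List.insertBy (fun a b => decide (a.1 < b.1)) x (y :: t)
          = y :: PySem.List.insertBy (fun a b => decide (a.1 < b.1)) x t := by
        simp [PySem.List.insertBy, hlt]
      rw [hi, List.filter_cons, List.filter_cons, ih ht]
      by_cases hy : y.1 = r <;> simp [hy]

-- the stable sort keyed on region preserves each region's line order
theorem sorted_filter_key (l : List (String × String)) (r : String) :
    (PySem.List.sorted l (fun t => t.1)).filter (fun z => z.1 == r)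
      = l.filter (fun z => z.1 == r) := by
  induction l using List.reverseRecOn with
  | nil => rfl
  | append_singleton t x ih =>
    have hs : PySem.List.sorted (t ++ [x]) (fun t => t.1)
        = PySem.List.insertBy (fun a b => decide (a.1 < b.1)) x
            (PySem.List.sorted t (fun t => t.1)) := by
      rw [PySem.List.sorted_eq_foldl_insertBy, PySem.List.sorted_eq_foldl_insertBy,
        List.foldl_append]
      rfl
    rw [hs, insertBy_filter_key x _ (PySem.List.sorted_pairwise t (fun t => t.1)) r, ih,
      List.filter_append]
    simp [List.filter_cons]

-- ===== VERDICT (by name: the statement is the Claim_ definition above) =====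
theorem build_signal_digest_py_spec : Claim_equal_build_signal_digest_py := by
  intro signals _
  unfold Spec_build_signal_digest_py
  show build_signal_digest_py signals = build_signal_digest_py_alt signals
  simp only [build_signal_digest_py, build_signal_digest_py_alt]
  rw [foldA]
  set entries := signals.filterMap sigEntry with hentries
  set es := PySem.List.sorted entries (fun t => t.1) with hes
  have hespw : es.Pairwise (fun a b => a.1 ≤ b.1) :=
    PySem.List.sorted_pairwise entries (fun t => t.1)
  have hkeys : ((entries.foldl (fun d p => d.modify p.1 [] (fun x => x ++ [p.2]))
      PySem.Dict.empty).keys) = PySem.Set.ofList (entries.map Prod.fst) := by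
    rw [PySem.Dict.keys_foldl_modify_key entries (fun p => p.1) []
      (fun _ p => fun x => x ++ [p.2]) PySem.Dict.empty]
    rfl
  have hitems : ∀ r, (entries.foldl (fun d p => d.modify p.1 [] (fun x => x ++ [p.2]))
      PySem.Dict.empty).getD r []
      = (entries.filter (fun p => p.1 == r)).map (fun z => z.2) := by
    intro r
    rw [PySem.Dict.getD_foldl_modify_append entries PySem.Dict.empty r,
      PySem.Dict.getD_empty, List.nil_append]
  have hkeysnodup : ((runs es).map Prod.fst).Nodup :=
    List.Pairwise.imp (fun h => ne_of_lt h) (keys_runs_pairwise es hespw)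
  have hperm : ((runs es).map Prod.fst).Perm (PySem.Set.ofList (entries.map Prod.fst)) := by
    rw [List.perm_ext_iff_of_nodup hkeysnodup (PySem.Set.nodup_ofList _)]
    intro r
    rw [mem_keys_runs es r, PySem.Set.mem_ofList]
    constructor
    · intro hr
      obtain ⟨z, hz, hz1⟩ := List.mem_map.mp hr
      exact List.mem_map.mpr
        ⟨z, (PySem.List.sorted_perm entries (fun t => t.1) false).mem_iff.mp hz, hz1⟩
    · intro hr
      obtain ⟨z, hz, hz1⟩ := List.mem_map.mp hr
      exact List.mem_map.mpr
        ⟨z, (PySem.List.sorted_perm entries (fun t => t.1) false).mem_iff.mpr hz, hz1⟩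
  have hsortK : PySem.List.sorted (PySem.Set.ofList (entries.map Prod.fst)) (fun r => r)
      = (runs es).map Prod.fst :=
    PySem.List.sorted_eq_of_perm_of_pairwise_lt _ _ (fun r => r) hperm
      (keys_runs_pairwise es hespw)
  rw [hkeys, hsortK, PySem.List.foldl_append_singleton_eq_map, List.nil_append, List.map_map]
  congr 1
  apply List.map_congr_left
  intro p hp
  have h2 : p.2 = (entries.filter (fun z => z.1 == p.1)).map (fun z => z.2) := by
    rw [runs_snd es hespw p hp, hes, sorted_filter_key]
  simp only [Function.comp_apply, hitems p.1, secOf, ← h2]
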